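-- pv_equiv track=rewrite | github.com/krvrvk222-a11y/Python-Programs | tcs.py | replace_with_rank
-- ===== SOURCE A (Python) =====
-- def replace_with_rank(arr):
--     sorted_arr = sorted(arr)
--
--     rank_map = {}
--     rank = 1
--
--     for num in sorted_arr:
--         if num not in rank_map:
--             rank_map[num] = rank
--             rank += 1
--
--     result = [rank_map[num] for num in arr]
--
--     return result
-- ===== SOURCE B (Python) =====
-- def replace_with_rank(arr):
--     # dense rank of x = 1 + number of distinct values in arr strictly below x;
--     # no sorting and no rank table needed
--     uniq = set(arr)
--     return [1 + len({y for y in uniq if y < x}) for x in arr]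
-- ===== Notes on version B (the rewrite author's own statement) =====
-- stated objective: alternative
-- what changed: Drops the sort and the rank-counter dict entirely: the dense rank of x equals 1 plus the count of distinct values strictly below x, so B computes each rank directly by a set comprehension counting the smaller distinct values (comparison counting over set(arr) instead of sort-then-table).
import Mathlib
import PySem

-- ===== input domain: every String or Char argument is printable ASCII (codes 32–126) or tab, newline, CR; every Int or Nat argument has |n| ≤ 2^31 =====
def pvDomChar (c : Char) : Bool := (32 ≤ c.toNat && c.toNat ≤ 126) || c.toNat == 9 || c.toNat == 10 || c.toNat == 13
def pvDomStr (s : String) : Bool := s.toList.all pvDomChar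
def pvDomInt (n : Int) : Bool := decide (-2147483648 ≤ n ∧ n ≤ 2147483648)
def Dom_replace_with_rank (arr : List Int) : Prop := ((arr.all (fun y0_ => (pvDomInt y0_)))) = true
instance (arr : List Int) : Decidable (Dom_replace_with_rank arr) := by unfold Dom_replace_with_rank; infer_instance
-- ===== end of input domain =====

-- B drops the sort and rank dict: the dense rank of x is 1 + the count of distinct values below x, computed per element by a set comprehension (alternative algorithm, same results).


-- ===== PORT A =====
-- literal port of A: sort, build rank_map over the sorted list with a running rank counter, then map lookups
def replace_with_rank (arr : List Int) : List Int :=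
  let sorted_arr := PySem.List.sorted arr (fun x => x)
  let st := sorted_arr.foldl
    (fun (p : PySem.Dict Int Int × Int) num =>
      if p.1.contains num = false then (p.1.insert num p.2, p.2 + 1) else p)
    (PySem.Dict.empty, 1)
  arr.map (fun num => st.1.getD num 0)   -- rank_map[num]; every num of arr is a key, so the default is never used

-- ===== PORT B =====
-- literal port of B: uniq = set(arr); [1 + len({y for y in uniq if y < x}) for x in arr]
def replace_with_rank_alt (arr : List Int) : List Int :=
  let uniq := PySem.Set.ofList arr
  arr.map (fun x => 1 + ((PySem.Set.ofList (uniq.filter (fun y => y < x))).length : Int))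

-- ===== PRECONDITION & SPEC =====
def Spec_replace_with_rank (arr : List Int) (out : List Int) : Prop := out = replace_with_rank_alt arr
instance (arr : List Int) (out : List Int) : Decidable (Spec_replace_with_rank arr out) := by unfold Spec_replace_with_rank; infer_instance

-- ===== CLAIM (what is proved, stated in full; the proofs are below) =====
def Claim_equal_replace_with_rank : Prop := ∀ (arr : List Int), Dom_replace_with_rank arr → Spec_replace_with_rank arr (replace_with_rank arr)

-- ===== LEMMAS AND PROOFS =====

-- the dict A's loop builds over a list l: first occurrences of l mapped to 1,2,3,…
def pvMkDict (u : List Int) : PySem.Dict Int Int :=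
  ⟨u.zipIdx.map (fun p => (p.1, (p.2 : Int) + 1))⟩

theorem pvKeys_mkDict (u : List Int) : (pvMkDict u).keys = u := by
  simp [pvMkDict, PySem.Dict.keys, List.map_map, Function.comp_def]

-- if the first k positions satisfy p and the rest do not, countP p = k
theorem pvCountP_boundary (l : List Int) (p : Int → Bool) (k : Nat) (hk : k ≤ l.length)
    (h1 : ∀ j (hj : j < l.length), j < k → p l[j])
    (h2 : ∀ j (hj : j < l.length), k ≤ j → ¬ p l[j]) : l.countP p = k := by
  have hsplit : l = l.take k ++ l.drop k := (List.take_append_drop k l).symm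
  have htake : (l.take k).countP p = k := by
    rw [List.countP_eq_length.mpr, List.length_take, Nat.min_eq_left hk]
    intro a ha
    obtain ⟨j, hj, rfl⟩ := List.mem_iff_getElem.mp ha
    simp only [List.length_take] at hj
    rw [List.getElem_take]
    exact h1 j (by omega) (by omega)
  have hdrop : (l.drop k).countP p = 0 := by
    rw [List.countP_eq_zero]
    intro a ha
    obtain ⟨j, hj, rfl⟩ := List.mem_iff_getElem.mp ha
    rw [List.getElem_drop]
    exact h2 (k + j) (by simp at hj; omega) (by omega)
  calc l.countP p = (l.take k ++ l.drop k).countP p := by rw [← hsplit]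
    _ = k := by rw [List.countP_append, htake, hdrop]; omega

theorem pvOfList_append_singleton (l : List Int) (x : Int) :
    PySem.Set.ofList (l ++ [x]) =
      if x ∈ PySem.Set.ofList l then PySem.Set.ofList l else PySem.Set.ofList l ++ [x] := by
  simp only [PySem.Set.ofList, List.foldl_append, List.foldl_cons, List.foldl_nil, PySem.Set.add,
    PySem.Set.contains]
  split_ifs with h1 h2 h2 <;> simp_all

theorem pvOfList_sublist (l : List Int) : (PySem.Set.ofList l).Sublist l := by
  induction l using List.reverseRecOn with
  | nil => simp [PySem.Set.ofList, PySem.Set.empty]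
  | append_singleton l x ih =>
    rw [pvOfList_append_singleton]
    split_ifs
    · exact ih.trans (List.sublist_append_left l [x])
    · exact ih.append_right [x] |>.trans (by simp)

-- A's fold over any list l produces exactly pvMkDict of the distinct elements, and rank = size + 1
theorem pvFold_char (l : List Int) :
    l.foldl (fun (p : PySem.Dict Int Int × Int) num =>
        if p.1.contains num = false then (p.1.insert num p.2, p.2 + 1) else p)
      (PySem.Dict.empty, 1) =
    (pvMkDict (PySem.Set.ofList l), ((PySem.Set.ofList l).length : Int) + 1) := by
  induction l using List.reverseRecOn with
  | nil => rfl
  | append_singleton l x ih =>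
    rw [List.foldl_append, ih]
    simp only [List.foldl_cons, List.foldl_nil]
    have hc : (pvMkDict (PySem.Set.ofList l)).contains x
        = decide (x ∈ PySem.Set.ofList l) := by
      rw [PySem.Dict.contains_eq_decide_mem_keys, pvKeys_mkDict]
    by_cases hx : x ∈ PySem.Set.ofList l
    · rw [pvOfList_append_singleton]
      simp [hc, hx]
    · rw [pvOfList_append_singleton]
      have hcf : (pvMkDict (PySem.Set.ofList l)).contains x = false := by simp [hc, hx]
      rw [hcf]
      simp only [reduceIte, hx, if_false]
      refine Prod.ext ?_ ?_
      · apply PySem.Dict.ext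
        rw [PySem.Dict.items_insert_of_not_contains _ _ hcf]
        simp [pvMkDict, List.zipIdx_append]
      · simp

-- lookup in pvMkDict u of v ∈ u (u nodup) gives idxOf + 1
theorem pvGetD_mkDict (u : List Int) (hu : u.Nodup) (v : Int) (hv : v ∈ u) :
    (pvMkDict u).getD v 0 = (u.idxOf v : Int) + 1 := by
  have hk : u.idxOf v < u.length := List.idxOf_lt_length_of_mem hv
  have hmem : (v, (u.idxOf v : Int) + 1) ∈ (pvMkDict u).items := by
    simp only [pvMkDict, List.mem_map]
    refine ⟨(v, u.idxOf v), ?_, rfl⟩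
    rw [List.mem_zipIdx_iff_getElem?]
    simp [List.getElem?_eq_getElem hk, List.getElem_idxOf]
  have hnd : (pvMkDict u).keys.Nodup := by rw [pvKeys_mkDict]; exact hu
  exact PySem.Dict.getD_of_mem_items _ hmem hnd 0

-- in a strictly increasing list, idxOf v = number of elements < v
theorem pvIdxOf_eq_countP (u : List Int) (hu : u.Pairwise (· < ·)) (v : Int) (hv : v ∈ u) :
    u.idxOf v = u.countP (fun y => y < v) := by
  have hp := List.pairwise_iff_getElem.mp hu
  have hk : u.idxOf v < u.length := List.idxOf_lt_length_of_mem hv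
  have hkv : u[u.idxOf v] = v := List.getElem_idxOf hk
  refine (pvCountP_boundary u _ (u.idxOf v) (le_of_lt hk) ?_ ?_).symm
  · intro j hj hjk
    have := hp j (u.idxOf v) hj hk hjk
    rw [hkv] at this
    simpa using this
  · intro j hj hjk
    rcases eq_or_lt_of_le hjk with h | h
    · subst h; simp [hkv]
    · have := hp (u.idxOf v) j hk hj h
      rw [hkv] at this
      simp; omega

-- u = distinct elements of sorted(arr) is a permutation of set(arr)
theorem pvU_perm (arr : List Int) :
    (PySem.Set.ofList (PySem.List.sorted arr (fun x => x))).Perm (PySem.Set.ofList arr) := by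
  refine (List.perm_ext_iff_of_nodup (PySem.Set.nodup_ofList _) (PySem.Set.nodup_ofList _)).mpr ?_
  intro a
  rw [PySem.Set.mem_ofList, PySem.List.mem_sorted, PySem.Set.mem_ofList]

-- the count of distinct elements of arr below v equals the size of {y in set(arr) | y < v}
theorem pvCount_distinct_below (arr : List Int) (v : Int) :
    (PySem.Set.ofList arr).countP (fun y => y < v)
      = (PySem.Set.ofList ((PySem.Set.ofList arr).filter (fun y => y < v))).length := by
  rw [List.countP_eq_length_filter]
  apply List.Perm.length_eq
  refine (List.perm_ext_iff_of_nodup ((PySem.Set.nodup_ofList arr).filter _)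
    (PySem.Set.nodup_ofList _)).mpr ?_
  intro a
  rw [PySem.Set.mem_ofList]

-- ===== VERDICT (by name: the statement is the Claim_ definition above) =====
theorem replace_with_rank_spec : Claim_equal_replace_with_rank := by
  intro arr _
  unfold Spec_replace_with_rank replace_with_rank replace_with_rank_alt
  simp only [pvFold_char]
  apply List.map_congr_left
  intro num hnum
  set u := PySem.Set.ofList (PySem.List.sorted arr (fun x => x)) with hudef
  have hnd : u.Nodup := PySem.Set.nodup_ofList _
  have hmem : num ∈ u := by
    rw [hudef, PySem.Set.mem_ofList, PySem.List.mem_sorted]; exact hnum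
  have hle : u.Pairwise (· ≤ ·) :=
    (PySem.List.sorted_pairwise arr (fun x => x)).sublist (pvOfList_sublist _)
  have hlt : u.Pairwise (· < ·) :=
    (hnd.and hle).imp (fun h => lt_of_le_of_ne h.2 h.1)
  rw [pvGetD_mkDict u hnd num hmem, pvIdxOf_eq_countP u hlt num hmem,
    (pvU_perm arr).countP_eq, pvCount_distinct_below arr num]
  omega
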